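-- pv_equiv track=rewrite | github.com/yukishinohara/projects | topcoder/srm639/BoardFoldingDiv2.py | canFoldByRow
-- ===== SOURCE A (Python) =====
-- def canFoldByRow(i, paper):
--     col = len(paper[0])
--     row = len(paper)
--     if i <= (row / 2):
--         start, mid, end = 0, i, i*2
--         vs, ve = mid, row
--     else:
--         start, mid, end = i*2 - row, i, row
--         vs, ve = 0, mid
--     for j in range(0, col):
--         for r in range(start, mid):
--             cr = end - (r - start) - 1
--             if paper[r][j] != paper[cr][j]:
--                 return 0, vs, ve
--     return 1, vs, ve
-- ===== SOURCE B (Python) =====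
-- def canFoldByRow(i, paper):
--     col = len(paper[0])
--     row = len(paper)
--     if 2 * i <= row:
--         start, mid, end = 0, i, i * 2
--         vs, ve = i, row
--     else:
--         start, mid, end = i * 2 - row, i, row
--         vs, ve = 0, i
--     top = [r[:col] for r in paper[start:mid]]
--     bot = [r[:col] for r in paper[mid:end]]
--     ok = 1 if top == list(reversed(bot)) else 0
--     return ok, vs, ve
-- ===== Notes on version B (the rewrite author's own statement) =====
-- stated objective: simpler
-- what changed: Replaces A's nested column-major per-cell loop with its cr = end-(r-start)-1 mirror-index arithmetic by one direct comparison of the two fold halves, each row truncated to the paper's width col: paper[start:mid] == reversed(paper[mid:end]).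
-- outside the precondition, e.g. on canFoldByRow(-1, ['ab', 'cd']): A returns (1, -1, 2), B returns (0, -1, 2); on canFoldByRow(1, ['ab', 'b']): A returns (0, 1, 2), B returns (0, 1, 2)
import Mathlib
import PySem

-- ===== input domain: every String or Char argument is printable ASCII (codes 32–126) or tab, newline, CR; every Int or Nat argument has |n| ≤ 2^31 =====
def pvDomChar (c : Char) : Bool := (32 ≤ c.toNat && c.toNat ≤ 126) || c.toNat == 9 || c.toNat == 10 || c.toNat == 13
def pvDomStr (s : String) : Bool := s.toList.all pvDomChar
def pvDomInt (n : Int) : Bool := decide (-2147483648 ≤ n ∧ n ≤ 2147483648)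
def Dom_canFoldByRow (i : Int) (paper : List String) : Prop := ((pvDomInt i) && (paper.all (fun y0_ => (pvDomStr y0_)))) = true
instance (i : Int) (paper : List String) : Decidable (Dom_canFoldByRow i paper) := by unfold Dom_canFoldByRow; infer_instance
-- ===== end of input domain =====

-- B replaces A's nested column-major per-cell mirror-index loop by one direct comparison of
-- the two fold halves, each row truncated to the paper's width; objective: simpler.

-- ===== PORT A =====
-- paper[r][j] with defaults; inside Pre_ every access A makes is in range, so the defaults are never read.
def pvCharA (paper : List String) (r j : Int) : Char :=
  PySem.List.pyGetD (PySem.List.pyGetD paper r "").toList j ' '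

-- A's early-return nested loop: returns (0,vs,ve) at the first cell mismatch, (1,vs,ve) if none —
-- i.e. the first component is 1 iff every cell of the fold region matches its mirror cell.
-- 'i <= row / 2' is Python true division on ints; it is exactly 'i * 2 ≤ row'.
def canFoldByRow (i : Int) (paper : List String) : Int × Int × Int :=
  let col : Int := (PySem.List.pyGetD paper 0 "").toList.length
  let row : Int := paper.length
  let (start, mid, stop, vs, ve) :=
    if i * 2 ≤ row then ((0 : Int), i, i * 2, i, row) else (i * 2 - row, i, row, 0, i)
  if (PySem.List.pyRange 0 col 1).all (fun j =>
       (PySem.List.pyRange start mid 1).all (fun r =>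
         pvCharA paper r j == pvCharA paper (stop - (r - start) - 1) j))
  then (1, vs, ve) else (0, vs, ve)

-- ===== PORT B =====
def canFoldByRow_alt (i : Int) (paper : List String) : Int × Int × Int :=
  let col : Int := (PySem.List.pyGetD paper 0 "").toList.length
  let row : Int := paper.length
  let (start, mid, stop, vs, ve) :=
    if 2 * i ≤ row then ((0 : Int), i, i * 2, i, row) else (i * 2 - row, i, row, 0, i)
  let top := (PySem.List.slice paper (some start) (some mid)).map
      (fun t => PySem.Str.slice t none (some col))
  let bot := (PySem.List.slice paper (some mid) (some stop)).map
      (fun t => PySem.Str.slice t none (some col))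
  if top == bot.reverse then (1, vs, ve) else (0, vs, ve)

-- ===== PRECONDITION & SPEC =====
-- Pre_ excludes: the empty paper (A raises IndexError on paper[0]); papers whose fold region
-- contains a row shorter than the width col = len(paper[0]) (there A raises IndexError unless a
-- mismatch happens to be found first; the few such inputs on which A still returns are excluded
-- with it); and negative fold positions i, outside the natural domain of 'fold at row i'
-- (there A's loop is vacuously empty and its constant 1 is accidental).
def Pre_canFoldByRow (i : Int) (paper : List String) : Prop :=
  paper ≠ [] ∧ 0 ≤ i ∧
  ∀ r ∈ (if 2 * i ≤ (paper.length : Int)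
         then PySem.List.pyRange 0 (2 * i) 1
         else PySem.List.pyRange (2 * i - paper.length) paper.length 1),
    ((paper.headD "").toList.length : Int) ≤ ((PySem.List.pyGetD paper r "").toList.length : Int)
instance (i : Int) (paper : List String) : Decidable (Pre_canFoldByRow i paper) := by
  unfold Pre_canFoldByRow; infer_instance

def pvWitness_canFoldByRow : Int × List String := (1, ["ab", "cd"])

def Spec_canFoldByRow (i : Int) (paper : List String) (out : Int × Int × Int) : Prop := out = canFoldByRow_alt i paper
instance (i : Int) (paper : List String) (out : Int × Int × Int) : Decidable (Spec_canFoldByRow i paper out) := by unfold Spec_canFoldByRow; infer_instance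

-- ===== CLAIM (what is proved, stated in full; the proofs are below) =====
def Claim_equal_canFoldByRow : Prop := ∀ (i : Int) (paper : List String), Dom_canFoldByRow i paper → Pre_canFoldByRow i paper → Spec_canFoldByRow i paper (canFoldByRow i paper)

-- ===== LEMMAS AND PROOFS =====

-- Region row equality (through any per-row map f): the mapped top half equals the reversed
-- mapped bottom half iff each mapped row of the region equals its mapped mirror row.
theorem pv_rows_iff (f : String → String) (paper : List String) (s m e : Nat)
    (h1 : s ≤ m) (h2 : m ≤ e) (h3 : e ≤ paper.length) (hsym : e - m = m - s) :
    (((paper.drop s).take (m - s)).map f = ((((paper.drop m).take (e - m)).map f)).reverse)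
    ↔ ∀ k < m - s, f (paper.getD (s + k) "") = f (paper.getD (e - 1 - k) "") := by
  constructor
  · intro h k hk
    have hs : s + k < paper.length := by omega
    have he : e - 1 - k < paper.length := by omega
    rw [List.getD_eq_getElem _ _ hs, List.getD_eq_getElem _ _ he]
    have hk1 : k < (((paper.drop s).take (m - s)).map f).length := by
      simp only [List.length_map, List.length_take, List.length_drop]; omega
    have hk2 : k < ((((paper.drop m).take (e - m)).map f).reverse).length := by
      simp only [List.length_reverse, List.length_map, List.length_take, List.length_drop]; omega
    have e1 : (((paper.drop s).take (m - s)).map f)[k]'hk1 = f (paper[s + k]'hs) := by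
      rw [List.getElem_map, List.getElem_take, List.getElem_drop]
    have hX : m + ((((paper.drop m).take (e - m)).map f).length - 1 - k) = e - 1 - k := by
      simp only [List.length_map, List.length_take, List.length_drop]; omega
    have e2 : ((((paper.drop m).take (e - m)).map f).reverse)[k]'hk2
        = f (paper[e - 1 - k]'he) := by
      rw [List.getElem_reverse, List.getElem_map, List.getElem_take, List.getElem_drop]
      exact congrArg f (getElem_congr rfl hX (by rw [hX]; exact he))
    rw [← e1, ← e2]
    exact List.getElem_of_eq h hk1
  · intro h
    apply List.ext_getElem
    · simp only [List.length_reverse, List.length_map, List.length_take, List.length_drop]; omega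
    · intro k hk1 hk2
      simp only [List.length_map, List.length_take, List.length_drop] at hk1
      rw [List.getElem_map, List.getElem_take, List.getElem_drop, List.getElem_reverse,
          List.getElem_map, List.getElem_take, List.getElem_drop]
      have hk : k < m - s := by omega
      have hs : s + k < paper.length := by omega
      have he : e - 1 - k < paper.length := by omega
      have hX : m + ((((paper.drop m).take (e - m)).map f).length - 1 - k) = e - 1 - k := by
        simp only [List.length_map, List.length_take, List.length_drop]; omega
      refine Eq.trans ?_ (congrArg f (getElem_congr rfl hX.symm he))
      have hh := h k hk
      rw [List.getD_eq_getElem _ _ hs, List.getD_eq_getElem _ _ he] at hh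
      exact hh

-- Per-column character equality of the first col characters is equality of the col-truncated rows.
theorem pv_str_iff (a b : String) (col : Nat)
    (ha : col ≤ a.toList.length) (hb : col ≤ b.toList.length) :
    PySem.Str.slice a none (some (col : Int)) = PySem.Str.slice b none (some (col : Int))
    ↔ ∀ j < col, a.toList.getD j ' ' = b.toList.getD j ' ' := by
  have bridge : ∀ t : String,
      (PySem.Str.slice t none (some (col : Int))).toList = t.toList.take col := by
    intro t
    simp [pysem, PySem.List.slice_to_natCast]
  constructor
  · intro h j hj
    have hja : j < a.toList.length := by omega
    have hjb : j < b.toList.length := by omega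
    rw [List.getD_eq_getElem _ _ hja, List.getD_eq_getElem _ _ hjb]
    have hl := congrArg String.toList h
    rw [bridge, bridge] at hl
    have hj1 : j < (a.toList.take col).length := by
      simp only [List.length_take]; omega
    have e1 : (a.toList.take col)[j]'hj1 = a.toList[j]'hja := by
      rw [List.getElem_take]
    have e2 : (b.toList.take col)[j]'(by simp only [List.length_take]; omega) = b.toList[j]'hjb := by
      rw [List.getElem_take]
    rw [← e1, ← e2]
    exact List.getElem_of_eq hl hj1
  · intro h
    apply String.toList_inj.mp
    rw [bridge, bridge]
    apply List.ext_getElem (by simp only [List.length_take]; omega)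
    intro j hj1 hj2
    simp only [List.length_take] at hj1
    rw [List.getElem_take, List.getElem_take]
    have hv := h j (by omega)
    rwa [List.getD_eq_getElem _ _ (by omega), List.getD_eq_getElem _ _ (by omega)] at hv

-- Core: A's per-cell mirror scan over the fold region (whose rows all have width ≥ col)
-- succeeds iff the col-truncated top half equals the reversed col-truncated bottom half.
theorem pv_core (paper : List String) (col : Nat)
    (s m e : Nat) (h1 : s ≤ m) (h2 : m ≤ e) (h3 : e ≤ paper.length)
    (hsym : e - m = m - s)
    (hreg : ∀ r : Nat, s ≤ r → r < e → col ≤ (paper.getD r "").toList.length) :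
    ((PySem.List.pyRange ((0 : Nat) : Int) (col : Int) 1).all (fun j =>
       (PySem.List.pyRange (s : Int) (m : Int) 1).all (fun r =>
         pvCharA paper r j == pvCharA paper ((e : Int) - (r - (s : Int)) - 1) j)))
    = ((PySem.List.slice paper (some (s : Int)) (some (m : Int))).map
         (fun t => PySem.Str.slice t none (some (col : Int)))
        == ((PySem.List.slice paper (some (m : Int)) (some (e : Int))).map
             (fun t => PySem.Str.slice t none (some (col : Int)))).reverse) := by
  apply Bool.coe_iff_coe.mp
  simp only [List.all_eq_true, PySem.List.mem_pyRange_one, beq_iff_eq,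
    PySem.List.slice_natCast]
  rw [pv_rows_iff (fun t => PySem.Str.slice t none (some (col : Int))) paper s m e h1 h2 h3 hsym]
  constructor
  · intro h k hk
    have hs : s + k < paper.length := by omega
    have he : e - 1 - k < paper.length := by omega
    rw [pv_str_iff _ _ col (hreg (s + k) (by omega) (by omega))
      (hreg (e - 1 - k) (by omega) (by omega))]
    intro j hj
    have hh := h (j : Int) ⟨by omega, by exact_mod_cast hj⟩
      ((s + k : Nat) : Int) ⟨by exact_mod_cast Nat.le_add_right s k, by omega⟩
    have hcr : (e : Int) - (((s + k : Nat) : Int) - (s : Int)) - 1 = ((e - 1 - k : Nat) : Int) := by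
      omega
    rw [hcr] at hh
    simp only [pvCharA, PySem.List.pyGetD_natCast] at hh
    exact hh
  · intro h j hjmem r hrmem
    obtain ⟨hj0, hjc⟩ := hjmem
    obtain ⟨hr0, hrm⟩ := hrmem
    have hrk : r = ((s + (r - (s : Int)).toNat : Nat) : Int) := by omega
    set k : Nat := (r - (s : Int)).toNat with hkdef
    have hk : k < m - s := by omega
    have hjn : j = ((j.toNat : Nat) : Int) := by omega
    have hh := h k hk
    rw [pv_str_iff _ _ col (hreg (s + k) (by omega) (by omega))
      (hreg (e - 1 - k) (by omega) (by omega))] at hh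
    rw [hrk, hjn]
    have hcr : (e : Int) - (((s + k : Nat) : Int) - (s : Int)) - 1 = ((e - 1 - k : Nat) : Int) := by
      omega
    rw [hcr]
    simp only [pvCharA, PySem.List.pyGetD_natCast]
    exact hh j.toNat (by omega)

-- ===== VERDICT (by name: the statement is the Claim_ definition above) =====
theorem canFoldByRow_spec : Claim_equal_canFoldByRow := by
  intro i paper _ hpre
  obtain ⟨hne, hi0, hreg0⟩ := hpre
  obtain ⟨iN, rfl⟩ : ∃ n : Nat, i = (n : Int) := ⟨i.toNat, by omega⟩
  have hcol0 : (PySem.List.pyGetD paper 0 "").toList.length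
      = (paper.headD "").toList.length := by
    cases paper with
    | nil => exact absurd rfl hne
    | cons p t => simp [PySem.List.pyGetD_zero]
  set col : Nat := (paper.headD "").toList.length
  unfold Spec_canFoldByRow canFoldByRow canFoldByRow_alt
  simp only [hcol0]
  by_cases hb : (iN : Int) * 2 ≤ (paper.length : Int)
  · have hb' : 2 * (iN : Int) ≤ (paper.length : Int) := by omega
    rw [if_pos hb, if_pos hb']
    dsimp only
    rw [if_pos hb'] at hreg0
    have hreg : ∀ r : Nat, 0 ≤ r → r < iN * 2 → col ≤ (paper.getD r "").toList.length := by
      intro r _ hr2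
      have hm := hreg0 (r : Int) (PySem.List.mem_pyRange_one.mpr ⟨by omega, by omega⟩)
      rw [PySem.List.pyGetD_natCast] at hm
      exact_mod_cast hm
    have c2 : (iN : Int) * 2 = ((iN * 2 : Nat) : Int) := by push_cast; ring
    have c0 : (0 : Int) = ((0 : Nat) : Int) := by norm_num
    rw [c2, c0,
      pv_core paper col 0 iN (iN * 2) (by omega) (by omega) (by omega) (by omega) hreg]
  · have hb' : ¬ 2 * (iN : Int) ≤ (paper.length : Int) := by omega
    rw [if_neg hb, if_neg hb']
    dsimp only
    rw [if_neg hb'] at hreg0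
    by_cases hile : iN ≤ paper.length
    · have hreg : ∀ r : Nat, iN * 2 - paper.length ≤ r → r < paper.length
          → col ≤ (paper.getD r "").toList.length := by
        intro r hr1 hr2
        have hm := hreg0 (r : Int) (PySem.List.mem_pyRange_one.mpr ⟨by omega, by omega⟩)
        rw [PySem.List.pyGetD_natCast] at hm
        exact_mod_cast hm
      have c1 : (iN : Int) * 2 - (paper.length : Int) = ((iN * 2 - paper.length : Nat) : Int) := by
        omega
      have c0 : (0 : Int) = ((0 : Nat) : Int) := by norm_num
      rw [c0, c1,
        pv_core paper col (iN * 2 - paper.length) iN paper.length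
          (by omega) (by omega) (by omega) (by omega) hreg]
    · -- iN > paper.length: the fold region is empty on both sides, both conditions hold
      rw [PySem.List.pyRange_one_eq_nil
        (show (iN : Int) ≤ (iN : Int) * 2 - (paper.length : Int) by omega)]
      have s1 : PySem.List.slice paper (some ((iN : Int) * 2 - (paper.length : Int)))
          (some ((iN : Nat) : Int)) = [] := by
        rw [PySem.List.slice_toNat paper (by omega) (by omega)]
        rw [show ((iN : Nat) : Int).toNat - ((iN : Int) * 2 - (paper.length : Int)).toNat = 0
          from by omega]
        simp
      have s2 : PySem.List.slice paper (some ((iN : Nat) : Int))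
          (some ((paper.length : Nat) : Int)) = [] := by
        rw [PySem.List.slice_natCast]
        rw [show paper.length - iN = 0 from by omega]
        simp
      simp [s1, s2]
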